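-- pv_equiv track=rewrite | github.com/MaitreLeone/AI-Projects | text_analysis/segmentation.py | start_position
-- ===== SOURCE A (Python) =====
-- def start_position(sentence, text):
--     symbols = 1
--     try:
--         while len(text.split(sentence[:symbols])) > 2 and symbols < len(sentence):
--             symbols += 1
--     except:
--         while len(text.split()) > 2 and symbols < len(sentence):
--             symbols += 1
--     return text.find(sentence[:symbols])
-- ===== SOURCE B (Python) =====
-- def start_position(sentence, text):
--     # Binary search over the prefix length: the number of disjoint occurrences
--     # of sentence[:k] in text is non-increasing in k, so "more than one
--     # occurrence" is a monotone predicate.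
--     lo, hi = 1, len(sentence)
--     while lo < hi:
--         mid = (lo + hi) // 2
--         if len(text.split(sentence[:mid])) > 2:
--             lo = mid + 1
--         else:
--             hi = mid
--     return text.find(sentence[:lo])
-- ===== Notes on version B (the rewrite author's own statement) =====
-- stated objective: faster
-- what changed: Replaces A's linear scan over prefix lengths (one text.split per length) by a binary search over the prefix length, valid because the disjoint-occurrence count of a prefix in the text is non-increasing in the prefix length.
import Mathlib
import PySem

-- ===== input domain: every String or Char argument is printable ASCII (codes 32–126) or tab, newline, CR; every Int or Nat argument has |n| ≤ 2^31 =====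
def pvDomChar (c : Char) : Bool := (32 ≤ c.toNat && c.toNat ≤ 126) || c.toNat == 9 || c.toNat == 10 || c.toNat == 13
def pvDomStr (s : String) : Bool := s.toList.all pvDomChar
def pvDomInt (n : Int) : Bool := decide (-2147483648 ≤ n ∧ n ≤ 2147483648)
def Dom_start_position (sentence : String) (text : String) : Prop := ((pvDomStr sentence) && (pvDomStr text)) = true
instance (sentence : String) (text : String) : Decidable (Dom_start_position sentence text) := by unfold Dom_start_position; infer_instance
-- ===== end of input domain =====

-- B replaces A's linear scan over prefix lengths by a binary search over the prefix
-- length (the disjoint-occurrence count of a prefix in the text is antitone in the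
-- prefix length), keeping the exact return value; objective: faster.


-- ===== PORT A =====
-- len(text.split(sentence[:k])) > 2  (both Pythons contain this very test)
def pvMulti (text sentence : List Char) (k : Nat) : Bool :=
  decide (2 < (PySem.Chars.splitOn text (sentence.take k)).length)

-- A's try-block loop: while len(text.split(sentence[:symbols])) > 2 and symbols < len(sentence): symbols += 1
def pvLoopA (text sentence : List Char) (symbols : Nat) : Nat :=
  if h : pvMulti text sentence symbols = true ∧ symbols < sentence.length then
    pvLoopA text sentence (symbols + 1)
  else symbols
termination_by sentence.length - symbols
decreasing_by omega

-- A's except-branch loop: while len(text.split()) > 2 and symbols < len(sentence): symbols += 1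
def pvLoopExc (text : List Char) (n symbols : Nat) : Nat :=
  if h : 2 < (PySem.Chars.split₀ text).length ∧ symbols < n then
    pvLoopExc text n (symbols + 1)
  else symbols
termination_by n - symbols
decreasing_by omega

-- text.split(sentence[:symbols]) raises (ValueError: empty separator) exactly when sentence = ""
def start_position (sentence : String) (text : String) : Int :=
  let s := sentence.toList
  let t := text.toList
  let symbols := if s.isEmpty then pvLoopExc t s.length 1 else pvLoopA t s 1
  PySem.Chars.find t (s.take symbols)

-- ===== PORT B =====
-- binary search: smallest k in [1, len(sentence)] whose prefix occurs at most once, capped at len(sentence)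
def pvBS (text sentence : List Char) (lo hi : Nat) : Nat :=
  if h : lo < hi then
    let mid := (lo + hi) / 2      -- (lo + hi) // 2 on nonnegative ints is Nat division
    if pvMulti text sentence mid then pvBS text sentence (mid + 1) hi
    else pvBS text sentence lo mid
  else lo
termination_by hi - lo
decreasing_by all_goals omega

def start_position_alt (sentence : String) (text : String) : Int :=
  let s := sentence.toList
  let t := text.toList
  let k := pvBS t s 1 s.length
  PySem.Chars.find t (s.take k)

-- ===== PRECONDITION & SPEC =====
def Spec_start_position (sentence : String) (text : String) (out : Int) : Prop := out = start_position_alt sentence text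
instance (sentence : String) (text : String) (out : Int) : Decidable (Spec_start_position sentence text out) := by unfold Spec_start_position; infer_instance

-- ===== CLAIM (what is proved, stated in full; the proofs are below) =====
def Claim_equal_start_position : Prop := ∀ (sentence : String) (text : String), Dom_start_position sentence text → Spec_start_position sentence text (start_position sentence text)

-- ===== LEMMAS AND PROOFS =====

-- greedy disjoint-occurrence counter mirroring PySem.Chars.splitOn.go (fuel-based)
def pvGF (sep : List Char) : Nat → List Char → Nat
  | 0, _ => 0
  | _ + 1, [] => 0
  | fuel + 1, c :: rest =>
    if sep.isPrefixOf (c :: rest) then 1 + pvGF sep fuel (List.drop sep.length (c :: rest))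
    else pvGF sep fuel rest

-- length of splitOn.go in terms of pvGF
theorem pvGo_length (sep : List Char) (hsep : sep ≠ []) :
    ∀ fuel : Nat, ∀ l cur : List Char, ∀ acc : List (List Char), l.length < fuel →
      (PySem.Chars.splitOn.go sep fuel l cur acc).length = acc.length + 1 + pvGF sep fuel l := by
  intro fuel
  induction fuel with
  | zero => intro l cur acc h; omega
  | succ f ih =>
    intro l cur acc h
    cases l with
    | nil => simp [PySem.Chars.splitOn.go, pvGF]
    | cons c rest =>
      have hlen : 1 ≤ sep.length := by
        cases sep with
        | nil => exact absurd rfl hsep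
        | cons a b => simp
      simp only [PySem.Chars.splitOn.go, pvGF]
      by_cases hp : sep.isPrefixOf (c :: rest) = true
      · have hcons : (c :: rest).length = rest.length + 1 := List.length_cons ..
        have hdrop : (List.drop sep.length (c :: rest)).length = (c :: rest).length - sep.length :=
          List.length_drop ..
        simp only [hp, if_true]
        rw [ih _ _ _ (by omega)]
        simp; omega
      · simp only [hp, Bool.false_eq_true, if_false]
        rw [ih _ _ _ (by simp at h ⊢; omega)]

theorem pvSplitOn_length (s sep : List Char) (hsep : sep ≠ []) :
    (PySem.Chars.splitOn s sep).length = 1 + pvGF sep (s.length + 1) s := by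
  unfold PySem.Chars.splitOn
  rw [pvGo_length sep hsep (s.length + 1) s [] [] (by omega)]
  simp

-- extraction: at least one greedy piece → an occurrence exists
theorem pvGF_one_occ (sep : List Char) (_hsep : sep ≠ []) :
    ∀ fuel : Nat, ∀ l : List Char, 1 ≤ pvGF sep fuel l → ∃ i, sep <+: l.drop i := by
  intro fuel
  induction fuel with
  | zero => intro l h; simp [pvGF] at h
  | succ f ih =>
    intro l h
    cases l with
    | nil => simp [pvGF] at h
    | cons c rest =>
      simp only [pvGF] at h
      by_cases hp : sep.isPrefixOf (c :: rest) = true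
      · exact ⟨0, by simpa using List.isPrefixOf_iff_prefix.mp hp⟩
      · simp only [hp, Bool.false_eq_true, if_false] at h
        obtain ⟨i, hi⟩ := ih rest h
        exact ⟨i + 1, by simpa [List.drop_succ_cons] using hi⟩

-- extraction: two greedy pieces → two disjoint occurrences
theorem pvGF_two_occ (sep : List Char) (hsep : sep ≠ []) :
    ∀ fuel : Nat, ∀ l : List Char, 2 ≤ pvGF sep fuel l →
      ∃ i j, sep <+: l.drop i ∧ sep <+: l.drop j ∧ i + sep.length ≤ j := by
  intro fuel
  induction fuel with
  | zero => intro l h; simp [pvGF] at h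
  | succ f ih =>
    intro l h
    cases l with
    | nil => simp [pvGF] at h
    | cons c rest =>
      simp only [pvGF] at h
      by_cases hp : sep.isPrefixOf (c :: rest) = true
      · simp only [hp, if_true] at h
        obtain ⟨i, hi⟩ := pvGF_one_occ sep hsep f (List.drop sep.length (c :: rest)) (by omega)
        refine ⟨0, sep.length + i, by simpa using List.isPrefixOf_iff_prefix.mp hp, ?_, by omega⟩
        rw [← List.drop_drop]
        exact hi
      · simp only [hp, Bool.false_eq_true, if_false] at h
        obtain ⟨i, j, h1, h2, h3⟩ := ih rest h
        exact ⟨i + 1, j + 1, by simpa [List.drop_succ_cons] using h1,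
          by simpa [List.drop_succ_cons] using h2, by omega⟩

-- injection: an occurrence → at least one greedy piece
theorem pvOcc_gf_one (sep : List Char) (hsep : sep ≠ []) :
    ∀ fuel : Nat, ∀ l : List Char, l.length ≤ fuel → ∀ i, sep <+: l.drop i →
      1 ≤ pvGF sep fuel l := by
  intro fuel
  induction fuel with
  | zero =>
    intro l hf i hi
    have : l = [] := List.eq_nil_of_length_eq_zero (by omega)
    subst this
    simp at hi
    exact absurd hi hsep
  | succ f ih =>
    intro l hf i hi
    cases l with
    | nil =>
      simp at hi
      exact absurd hi hsep
    | cons c rest =>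
      simp only [pvGF]
      by_cases hp : sep.isPrefixOf (c :: rest) = true
      · simp [hp]
      · simp only [hp, Bool.false_eq_true, if_false]
        cases i with
        | zero =>
          exact absurd (List.isPrefixOf_iff_prefix.mpr (by simpa using hi)) hp
        | succ i' =>
          exact ih rest (by simp at hf ⊢; omega) i' (by simpa [List.drop_succ_cons] using hi)

-- injection: two disjoint occurrences → at least two greedy pieces
theorem pvOcc_gf_two (sep : List Char) (hsep : sep ≠ []) :
    ∀ fuel : Nat, ∀ l : List Char, l.length ≤ fuel → ∀ i j, sep <+: l.drop i → sep <+: l.drop j →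
      i + sep.length ≤ j → 2 ≤ pvGF sep fuel l := by
  intro fuel
  induction fuel with
  | zero =>
    intro l hf i j hi hj hij
    have : l = [] := List.eq_nil_of_length_eq_zero (by omega)
    subst this
    simp at hi
    exact absurd hi hsep
  | succ f ih =>
    intro l hf i j hi hj hij
    have hlen : 1 ≤ sep.length := by
      cases sep with
      | nil => exact absurd rfl hsep
      | cons a b => simp
    cases l with
    | nil =>
      simp at hi
      exact absurd hi hsep
    | cons c rest =>
      simp only [pvGF]
      by_cases hp : sep.isPrefixOf (c :: rest) = true
      · simp only [hp, if_true]
        have hj' : sep <+: (List.drop sep.length (c :: rest)).drop (j - sep.length) := by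
          rw [List.drop_drop]
          have : sep.length + (j - sep.length) = j := by omega
          rw [this]
          exact hj
        have hcons : (c :: rest).length = rest.length + 1 := List.length_cons ..
        have hdrop : (List.drop sep.length (c :: rest)).length = (c :: rest).length - sep.length :=
          List.length_drop ..
        have := pvOcc_gf_one sep hsep f (List.drop sep.length (c :: rest))
          (by omega) (j - sep.length) hj'
        omega
      · simp only [hp, Bool.false_eq_true, if_false]
        cases i with
        | zero =>
          exact absurd (List.isPrefixOf_iff_prefix.mpr (by simpa using hi)) hp
        | succ i' =>
          cases j with
          | zero => omega
          | succ j' =>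
            exact ih rest (by simp at hf ⊢; omega) i' j'
              (by simpa [List.drop_succ_cons] using hi)
              (by simpa [List.drop_succ_cons] using hj) (by omega)

theorem pvTake_ne_nil (s : List Char) (k : Nat) (hs : s ≠ []) (hk : 1 ≤ k) : s.take k ≠ [] := by
  cases s with
  | nil => exact absurd rfl hs
  | cons a t =>
    cases k with
    | zero => omega
    | succ k => simp

-- the predicate "sentence[:k] occurs at least twice (disjointly) in text" is antitone in k
theorem pvMulti_anti (t s : List Char) (hs : s ≠ []) (j k : Nat) (hj : 1 ≤ j) (hjk : j ≤ k)
    (hk : pvMulti t s k = true) : pvMulti t s j = true := by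
  have hsk : s.take k ≠ [] := pvTake_ne_nil s k hs (by omega)
  have hsj : s.take j ≠ [] := pvTake_ne_nil s j hs hj
  unfold pvMulti at hk ⊢
  rw [decide_eq_true_iff] at hk ⊢
  rw [pvSplitOn_length t _ hsk] at hk
  rw [pvSplitOn_length t _ hsj]
  have h2 : 2 ≤ pvGF (s.take k) (t.length + 1) t := by omega
  obtain ⟨i, j', h1, h2', h3⟩ := pvGF_two_occ (s.take k) hsk (t.length + 1) t h2
  have hpre : s.take j <+: s.take k := List.take_prefix_take_left hjk
  have hlj : (s.take j).length ≤ (s.take k).length := by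
    simp [List.length_take]; omega
  have := pvOcc_gf_two (s.take j) hsj (t.length + 1) t (by omega) i j'
    (hpre.trans h1) (hpre.trans h2') (by omega)
  omega

-- A's loop: one step and stopping
theorem pvLoopA_step (t s : List Char) (k : Nat)
    (h : pvMulti t s k = true ∧ k < s.length) :
    pvLoopA t s k = pvLoopA t s (k + 1) := by
  rw [pvLoopA]
  simp [h]

theorem pvLoopA_stop (t s : List Char) (k : Nat)
    (h : ¬ (pvMulti t s k = true ∧ k < s.length)) :
    pvLoopA t s k = k := by
  rw [pvLoopA]
  simp only [h, dite_false]

theorem pvLoopA_advance (t s : List Char) :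
    ∀ d lo : Nat, (∀ k, lo ≤ k → k < lo + d → pvMulti t s k = true ∧ k < s.length) →
      pvLoopA t s lo = pvLoopA t s (lo + d) := by
  intro d
  induction d with
  | zero => intro lo _; rfl
  | succ d ih =>
    intro lo h
    rw [pvLoopA_step t s lo (h lo (le_refl lo) (by omega))]
    have := ih (lo + 1) (fun k hk1 hk2 => h k (by omega) (by omega))
    rw [this]
    congr 1
    omega

-- binary search = linear search, given the antitone predicate
theorem pvBS_eq_loopA (t s : List Char) (hs : s ≠ []) :
    ∀ fuel lo hi : Nat, hi - lo ≤ fuel → 1 ≤ lo → lo ≤ hi → hi ≤ s.length →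
      (hi = s.length ∨ pvMulti t s hi = false) →
      pvBS t s lo hi = pvLoopA t s lo := by
  intro fuel
  induction fuel with
  | zero =>
    intro lo hi hf h1 h2 h3 h4
    have : lo = hi := by omega
    subst this
    rw [pvBS]
    simp only [lt_irrefl, dite_false]
    rcases h4 with h4 | h4
    · exact (pvLoopA_stop t s lo (by omega)).symm
    · exact (pvLoopA_stop t s lo (by simp [h4])).symm
  | succ f ih =>
    intro lo hi hf h1 h2 h3 h4
    by_cases hlt : lo < hi
    · rw [pvBS]
      simp only [hlt, dite_true]
      have hmid1 : lo ≤ (lo + hi) / 2 := by omega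
      have hmid2 : (lo + hi) / 2 < hi := by omega
      by_cases hm : pvMulti t s ((lo + hi) / 2) = true
      · simp only [hm, if_true]
        rw [ih ((lo + hi) / 2 + 1) hi (by omega) (by omega) (by omega) h3 h4]
        have hadv := pvLoopA_advance t s ((lo + hi) / 2 + 1 - lo) lo
          (fun k hk1 hk2 => ⟨pvMulti_anti t s hs k ((lo + hi) / 2) (by omega) (by omega) hm,
            by omega⟩)
        rw [hadv]
        congr 1
        omega
      · simp only [hm, Bool.false_eq_true, if_false]
        exact ih lo ((lo + hi) / 2) (by omega) h1 (by omega) (by omega)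
          (Or.inr (by simpa using hm))
    · have : lo = hi := by omega
      subst this
      rw [pvBS]
      simp only [lt_irrefl, dite_false]
      rcases h4 with h4 | h4
      · exact (pvLoopA_stop t s lo (by omega)).symm
      · exact (pvLoopA_stop t s lo (by simp [h4])).symm

theorem pvLoopExc_one (t : List Char) : pvLoopExc t 0 1 = 1 := by
  rw [pvLoopExc]
  simp

-- ===== VERDICT (by name: the statement is the Claim_ definition above) =====
theorem start_position_spec : Claim_equal_start_position := by
  intro sentence text _
  unfold Spec_start_position start_position start_position_alt
  by_cases hs : sentence.toList = []
  · simp only [hs, List.isEmpty_nil, if_true, List.length_nil]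
    rw [pvLoopExc_one]
    rw [pvBS]
    simp
  · have hne : sentence.toList.isEmpty = false := by
      simp [hs]
    simp only [hne, Bool.false_eq_true, if_false]
    rw [pvBS_eq_loopA text.toList sentence.toList hs (sentence.toList.length - 1) 1
      sentence.toList.length (by omega) (le_refl 1)
      (by have := List.length_pos_of_ne_nil hs; omega)
      (le_refl _) (Or.inl rfl)]
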